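-- pv_equiv track=rewrite | github.com/oleh-339/Algo | eeg.py | eeg_peaks
-- ===== SOURCE A (Python) =====
-- def eeg_peaks(data):
--     if not data:
--         return 0, 0
--
--     # пікове значення активності
--     max_val = max(data)
--
--     max_duration = 0
--     current_duration = 0
--
--     # проходимо по всьому масиву
--     for value in data:
--         if value == max_val:
--             current_duration += 1
--             if current_duration > max_duration:
--                 max_duration = current_duration
--         else:
--             current_duration = 0
--
--     return max_duration, max_val
-- ===== SOURCE B (Python) =====
-- def eeg_peaks(data):
--     # group-then-select: split into maximal runs, keep best run-length of the max value
--     if not data: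
--         return 0, 0
--     max_val = max(data)
--     runs = []              # list of (value, run_length), maximal consecutive runs
--     i, n = 0, len(data)
--     while i < n:
--         j = i
--         while j < n and data[j] == data[i]:
--             j += 1
--         runs.append((data[i], j - i))
--         i = j
--     best = 0
--     for v, length in runs:
--         if v == max_val and length > best:
--             best = length
--     return best, max_val
-- ===== Notes on version B (the rewrite author's own statement) =====
-- stated objective: alternative
-- what changed: Replaces A's running-counter-with-reset single pass by a group-then-select decomposition: the list is first split into maximal runs of equal values, then the best length among runs of the max value is taken.
import Mathlib
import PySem

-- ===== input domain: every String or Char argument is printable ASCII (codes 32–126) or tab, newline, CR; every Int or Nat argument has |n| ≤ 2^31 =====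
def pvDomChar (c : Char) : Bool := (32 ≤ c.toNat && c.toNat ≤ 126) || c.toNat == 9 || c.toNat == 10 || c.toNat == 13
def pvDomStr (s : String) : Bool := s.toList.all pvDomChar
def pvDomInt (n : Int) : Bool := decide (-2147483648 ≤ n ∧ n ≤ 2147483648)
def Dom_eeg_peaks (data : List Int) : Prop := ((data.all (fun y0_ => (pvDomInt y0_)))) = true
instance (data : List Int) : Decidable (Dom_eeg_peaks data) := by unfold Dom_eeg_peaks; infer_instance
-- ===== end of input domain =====

-- B replaces A's running-counter-with-reset pass by a group-then-select decomposition
-- (split into maximal runs, then pick the best run-length of the max value); same return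
-- value everywhere, no speed claim (objective: alternative).

-- ===== PORT A =====
-- A's loop body: state (max_duration, current_duration), one element at a time
def stepA (m : Int) (s : Int × Int) (v : Int) : Int × Int :=
  if v = m then
    if s.2 + 1 > s.1 then (s.2 + 1, s.2 + 1) else (s.1, s.2 + 1)
  else (s.1, 0)

def eeg_peaks (data : List Int) : Int × Int :=
  match data with
  | [] => (0, 0)
  | x :: t =>
    -- max(data) on a nonempty list is the running-max loop (PySem.List.max?_id_cons)
    let m := t.foldl max x
    let s := data.foldl (stepA m) (0, 0)
    (s.1, m)

-- ===== PORT B =====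
-- the two nested while loops of Source B: scan forward while the value repeats (inner while),
-- emit the finished run (value, length) and start the next one (outer while)
def runsAux : Int → Int → List Int → List (Int × Int)
  | v, c, [] => [(v, c)]
  | v, c, x :: xs => if x = v then runsAux v (c + 1) xs else (v, c) :: runsAux x 1 xs

-- Source B's final selection loop over the runs
def stepB (m : Int) (b : Int) (p : Int × Int) : Int :=
  if p.1 = m ∧ p.2 > b then p.2 else b

def eeg_peaks_alt (data : List Int) : Int × Int :=
  match data with
  | [] => (0, 0)
  | x :: t =>
    -- max(data) on a nonempty list is the running-max loop (PySem.List.max?_id_cons)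
    let m := t.foldl max x
    let runs := runsAux x 1 t
    let best := runs.foldl (stepB m) 0
    (best, m)

-- ===== PRECONDITION & SPEC =====
def Spec_eeg_peaks (data : List Int) (out : Int × Int) : Prop := out = eeg_peaks_alt data
instance (data : List Int) (out : Int × Int) : Decidable (Spec_eeg_peaks data out) := by unfold Spec_eeg_peaks; infer_instance

-- ===== CLAIM (what is proved, stated in full; the proofs are below) =====
def Claim_equal_eeg_peaks : Prop := ∀ (data : List Int), Dom_eeg_peaks data → Spec_eeg_peaks data (eeg_peaks data)

-- ===== LEMMAS AND PROOFS =====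

-- A's step on a state that summarises a pending run (v repeated c times) extends the run / closes it
theorem stepA_extend (m v c b : Int) :
    stepA m (if v = m then (max b c, c) else (b, 0)) v
      = if v = m then (max b (c + 1), c + 1) else (b, 0) := by
  by_cases h : v = m <;> simp [stepA, h, max_def] <;> split_ifs <;> simp_all <;> omega

theorem stepA_switch (m v c b x : Int) (hxv : x ≠ v) :
    stepA m (if v = m then (max b c, c) else (b, 0)) x
      = (if x = m then (max (if v = m ∧ c > b then c else b) 1, 1)
         else ((if v = m ∧ c > b then c else b), 0)) := by
  by_cases hv : v = m <;> by_cases hx : x = m <;>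
    simp_all [stepA, max_def] <;> split_ifs <;> simp_all <;> omega

-- main invariant: folding B's selection over the remaining runs equals finishing A's pass
-- from a state whose pending run is (v, c) and whose best-so-far is b
theorem runs_fold (xs : List Int) : ∀ (m v c b : Int),
    (runsAux v c xs).foldl (stepB m) b
      = (xs.foldl (stepA m) (if v = m then (max b c, c) else (b, 0))).1 := by
  induction xs with
  | nil =>
    intro m v c b
    by_cases h : v = m <;> simp [runsAux, stepB, h, max_def] <;> split_ifs <;> omega
  | cons x t ih =>
    intro m v c b
    by_cases hxv : x = v
    · subst hxv
      simp only [runsAux, if_true, List.foldl_cons, ih, stepA_extend]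
    · simp only [runsAux, if_neg hxv, List.foldl_cons, ih, stepA_switch m v c b x hxv, stepB]

-- ===== VERDICT (by name: the statement is the Claim_ definition above) =====
theorem eeg_peaks_spec : Claim_equal_eeg_peaks := by
  intro data _
  unfold Spec_eeg_peaks
  cases data with
  | nil => rfl
  | cons x t =>
    simp only [eeg_peaks, eeg_peaks_alt, List.foldl_cons]
    have h := runs_fold t (t.foldl max x) x 1 0
    have hinit : ∀ m : Int, stepA m (0, 0) x
        = (if x = m then (max 0 1, 1) else ((0 : Int), (0 : Int))) := by
      intro m; by_cases hx : x = m <;> simp [stepA, hx]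
    rw [hinit, ← h]
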